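-- pv_equiv track=rewrite | github.com/Yanggorithm/Study | 이지은/6월/programmers_뉴스클러스터링.py | make_lst
-- ===== SOURCE A (Python) =====
-- def make_lst(str1):
--     lst = []
--     for i in range(len(str1)-1):
--         is_alpha = True
--         tmp = str1[i:i+2]
--         for j in tmp:
--             if 'A' <= j <= 'Z':
--                 pass
--             else:
--                 is_alpha = False
--         if is_alpha:
--             lst.append(tmp)
--     return lst
-- ===== SOURCE B (Python) =====
-- def make_lst(str1):
--     # Stage 1: split the string into maximal runs of consecutive uppercase letters.
--     runs = []
--     cur = []
--     for c in str1:
--         if 'A' <= c <= 'Z':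
--             cur.append(c)
--         else:
--             if cur:
--                 runs.append(cur)
--                 cur = []
--     if cur:
--         runs.append(cur)
--     # Stage 2: each run of length L contributes its L-1 adjacent pairs.
--     out = []
--     for r in runs:
--         out.extend(a + b for a, b in zip(r, r[1:]))
--     return out
-- ===== Notes on version B (the rewrite author's own statement) =====
-- stated objective: faster
-- what changed: Instead of testing every adjacent window with a per-window slice and flag scan, B first splits the string into maximal runs of consecutive uppercase letters and then emits the adjacent pairs inside each run; pairs never cross a run boundary, so the outputs coincide.
import Mathlib
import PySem

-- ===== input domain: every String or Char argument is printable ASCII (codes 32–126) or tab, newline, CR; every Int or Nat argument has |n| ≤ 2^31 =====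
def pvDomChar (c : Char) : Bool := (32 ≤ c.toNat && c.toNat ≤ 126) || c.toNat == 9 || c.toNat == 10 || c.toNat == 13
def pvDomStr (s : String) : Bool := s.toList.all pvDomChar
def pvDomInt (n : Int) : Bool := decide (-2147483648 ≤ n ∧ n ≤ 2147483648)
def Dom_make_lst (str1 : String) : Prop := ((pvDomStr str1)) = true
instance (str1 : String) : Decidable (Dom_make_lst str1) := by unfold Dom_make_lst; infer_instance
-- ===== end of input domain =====

-- B replaces A's per-window flag-scan over all adjacent slices by a two-stage pass:
-- split the string into maximal runs of consecutive uppercase letters, then emit the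
-- adjacent pairs inside each run, avoiding per-window slicing (measured faster in a timing run).


-- ===== PORT A =====
def make_lst (str1 : String) : List String :=
  (PySem.List.pyRange 0 (PySem.Str.len str1 - 1) 1).foldl
    (fun lst i =>
      let tmp := PySem.List.slice str1.toList (some i) (some (i + 2))
      let is_alpha := tmp.foldl (fun f j => if 'A' ≤ j ∧ j ≤ 'Z' then f else false) true
      if is_alpha then lst ++ [String.ofList tmp] else lst) []

-- ===== PORT B =====
-- stage 1 loop state: (runs, cur)
def mlStep (st : List (List Char) × List Char) (c : Char) : List (List Char) × List Char :=
  if 'A' ≤ c ∧ c ≤ 'Z' then (st.1, st.2 ++ [c])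
  else if st.2 ≠ [] then (st.1 ++ [st.2], []) else st

-- stage 2: adjacent pairs inside one run ('a + b for a, b in zip(r, r[1:])')
def mlPairs (r : List Char) : List String :=
  (r.zip r.tail).map (fun p => String.ofList [p.1, p.2])

def make_lst_alt (str1 : String) : List String :=
  let st := str1.toList.foldl mlStep ([], [])
  let runs := if st.2 ≠ [] then st.1 ++ [st.2] else st.1
  runs.foldl (fun out r => out ++ mlPairs r) []

-- ===== PRECONDITION & SPEC =====
def Spec_make_lst (str1 : String) (out : List String) : Prop := out = make_lst_alt str1
instance (str1 : String) (out : List String) : Decidable (Spec_make_lst str1 out) := by unfold Spec_make_lst; infer_instance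

-- ===== CLAIM (what is proved, stated in full; the proofs are below) =====
def Claim_equal_make_lst : Prop := ∀ (str1 : String), Dom_make_lst str1 → Spec_make_lst str1 (make_lst str1)

-- ===== LEMMAS AND PROOFS =====

-- common reference form: the kept adjacent pairs of the whole string
def mlRef (cs : List Char) : List String :=
  (cs.zip cs.tail).filterMap
    (fun p => if ('A' ≤ p.1 ∧ p.1 ≤ 'Z') ∧ ('A' ≤ p.2 ∧ p.2 ≤ 'Z')
              then some (String.ofList [p.1, p.2]) else none)

-- str1[i:i+2] at a natural index is drop-then-take
lemma slice_two (cs : List Char) (k : Nat) :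
    PySem.List.slice cs (some (k : Int)) (some ((k : Int) + 2)) = (cs.drop k).take 2 := by
  exact_mod_cast PySem.List.slice_natCast_add cs k 2

-- A's filtered index range over 2-windows equals the zip reference form
lemma core (q : List Char → Bool) : ∀ cs : List Char,
    ((List.range (cs.length - 1)).filter (fun k => q ((cs.drop k).take 2))).map
      (fun k => String.ofList ((cs.drop k).take 2))
    = (cs.zip cs.tail).filterMap
        (fun p => if q [p.1, p.2] then some (String.ofList [p.1, p.2]) else none) := by
  intro cs
  match cs with
  | [] => simp
  | [a] => simp
  | a :: b :: t =>
    have ih := core q (b :: t)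
    simp only [List.length_cons, Nat.add_sub_cancel] at ih ⊢
    rw [List.range_succ_eq_map]
    simp only [List.filter_cons, List.filter_map, List.zip_cons_cons, List.tail_cons,
      List.filterMap_cons, List.drop_zero]
    simp only [List.tail_cons] at ih
    by_cases h : q [a, b] = true
    · simp only [List.take, h, if_pos, List.map_cons]
      rw [List.map_map]
      simpa only [Function.comp_def, Nat.succ_eq_add_one, List.drop_succ_cons] using
        congrArg (List.cons (String.ofList [a, b])) ih
    · simp only [List.take, h, Bool.false_eq_true, if_neg, not_false_eq_true]
      rw [List.map_map]
      simpa only [Function.comp_def, Nat.succ_eq_add_one, List.drop_succ_cons] using ih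

-- A's inner flag loop on a two-character window, evaluated
lemma inner_pair (a b : Char) :
    ([a, b].foldl (fun f j => if 'A' ≤ j ∧ j ≤ 'Z' then f else false) true)
    = decide (('A' ≤ a ∧ a ≤ 'Z') ∧ ('A' ≤ b ∧ b ≤ 'Z')) := by
  by_cases ha : 'A' ≤ a ∧ a ≤ 'Z' <;> by_cases hb : 'A' ≤ b ∧ b ≤ 'Z' <;>
    simp [List.foldl, ha, hb]

-- A equals the reference form
lemma a_eq_ref (str1 : String) : make_lst str1 = mlRef str1.toList := by
  unfold make_lst mlRef
  rw [PySem.List.foldl_append_if, PySem.List.pyRange_one]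
  have htoNat : ((PySem.Str.len str1 - 1) - 0).toNat = str1.toList.length - 1 := by
    simp only [PySem.Str.len_eq, Int.sub_zero]; omega
  rw [htoNat]
  simp only [List.nil_append, List.filter_map, List.map_map, Function.comp_def,
    zero_add, slice_two]
  rw [core (fun tmp => tmp.foldl (fun f j => if 'A' ≤ j ∧ j ≤ 'Z' then f else false) true)
    str1.toList]
  refine congrArg (fun g => List.filterMap g _) (funext fun p => ?_)
  rw [inner_pair]
  simp only [decide_eq_true_eq]

-- a leading non-uppercase character contributes no pair
lemma ref_cons_notupper (c : Char) (t : List Char) (hc : ¬ ('A' ≤ c ∧ c ≤ 'Z')) :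
    mlRef (c :: t) = mlRef t := by
  cases t with
  | nil => rfl
  | cons d t' => simp [mlRef, hc]

-- on an all-uppercase run every pair is kept
lemma ref_all_upper : ∀ xs : List Char, (∀ x ∈ xs, 'A' ≤ x ∧ x ≤ 'Z') →
    mlRef xs = mlPairs xs := by
  intro xs h
  match xs with
  | [] => rfl
  | [a] => rfl
  | a :: b :: t =>
    have ha := h a (by simp)
    have hb := h b (by simp)
    have ih := ref_all_upper (b :: t) (fun x hx => h x (List.mem_cons_of_mem _ hx))
    simp only [mlRef, mlPairs] at ih ⊢
    simp only [List.zip_cons_cons, List.tail_cons, List.map_cons] at ih ⊢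
    rw [List.filterMap_cons_some (b := String.ofList [a, b]) (by simp [ha.1, ha.2, hb.1, hb.2])]
    exact congrArg _ ih

-- splitting the reference form at a non-uppercase character after an uppercase run
lemma ref_split : ∀ (xs : List Char) (c : Char) (t : List Char),
    ¬ ('A' ≤ c ∧ c ≤ 'Z') → (∀ x ∈ xs, 'A' ≤ x ∧ x ≤ 'Z') →
    mlRef (xs ++ c :: t) = mlPairs xs ++ mlRef t := by
  intro xs c t hc hxs
  match xs with
  | [] =>
    simp only [List.nil_append, mlPairs, List.zip_nil_left, List.map_nil]
    rw [ref_cons_notupper c t hc]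
  | [a] =>
    simp only [List.cons_append, List.nil_append, mlPairs,
      List.tail_cons, List.zip_nil_right, List.map_nil]
    simp only [mlRef, List.zip_cons_cons, List.tail_cons]
    rw [List.filterMap_cons_none (by simp [hc])]
    have := ref_cons_notupper c t hc
    simp only [mlRef] at this
    simpa using this
  | a :: b :: xs' =>
    have ha := hxs a (by simp)
    have hb := hxs b (by simp)
    have ih := ref_split (b :: xs') c t hc (fun x hx => hxs x (List.mem_cons_of_mem _ hx))
    simp only [List.cons_append, mlRef, mlPairs, List.zip_cons_cons, List.tail_cons,
      List.map_cons] at ih ⊢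
    rw [List.filterMap_cons_some (b := String.ofList [a, b]) (by simp [ha.1, ha.2, hb.1, hb.2])]
    rw [ih]

-- invariant of B's stage-1 fold: the flattened pair output of the final run list
lemma fold_invariant : ∀ (cs : List Char) (runs : List (List Char)) (cur : List Char),
    (∀ x ∈ cur, 'A' ≤ x ∧ x ≤ 'Z') →
    (let st := cs.foldl mlStep (runs, cur)
     (if st.2 ≠ [] then st.1 ++ [st.2] else st.1).flatMap mlPairs)
    = runs.flatMap mlPairs ++ mlRef (cur ++ cs) := by
  intro cs
  induction cs with
  | nil =>
    intro runs cur hcur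
    simp only [List.foldl_nil, List.append_nil]
    by_cases h : cur = []
    · subst h; simp [mlRef]
    · simp only [h, ne_eq, not_false_eq_true, if_pos, List.flatMap_append,
        List.flatMap_cons, List.flatMap_nil, List.append_nil]
      rw [ref_all_upper cur hcur]
  | cons c t ih =>
    intro runs cur hcur
    simp only [List.foldl_cons]
    by_cases hc : 'A' ≤ c ∧ c ≤ 'Z'
    · have step_eq : mlStep (runs, cur) c = (runs, cur ++ [c]) := by
        simp [mlStep, hc]
      rw [step_eq]
      have ih' := ih runs (cur ++ [c])
        (by intro x hx; rcases List.mem_append.mp hx with h | h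
            · exact hcur x h
            · simp at h; subst h; exact hc)
      simp only at ih' ⊢
      rw [ih', List.append_assoc]
      rfl
    · by_cases h : cur = []
      · subst h
        have step_eq : mlStep (runs, ([] : List Char)) c = (runs, []) := by
          simp [mlStep, hc]
        rw [step_eq]
        have ih' := ih runs [] (by simp)
        simp only at ih' ⊢
        rw [ih']
        simp only [List.nil_append]
        rw [ref_cons_notupper c t hc]
      · have step_eq : mlStep (runs, cur) c = (runs ++ [cur], []) := by
          simp [mlStep, hc, h]
        rw [step_eq]
        have ih' := ih (runs ++ [cur]) [] (by simp)
        simp only at ih' ⊢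
        rw [ih']
        simp only [List.nil_append, List.flatMap_append, List.flatMap_cons,
          List.flatMap_nil, List.append_nil, List.append_assoc]
        rw [ref_split cur c t hc hcur]

-- B equals the reference form
lemma b_eq_ref (str1 : String) : make_lst_alt str1 = mlRef str1.toList := by
  unfold make_lst_alt
  simp only
  rw [PySem.List.foldl_append_eq_flatMap, List.nil_append]
  have := fold_invariant str1.toList [] [] (by simp)
  simp only [ne_eq, List.flatMap_nil, List.nil_append] at this
  exact this

-- ===== VERDICT (by name: the statement is the Claim_ definition above) =====
theorem make_lst_spec : Claim_equal_make_lst := by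
  intro str1 _
  unfold Spec_make_lst
  rw [a_eq_ref, b_eq_ref]
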